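-- pv_equiv track=rewrite | github.com/AndresSanders/TopicModel_CiphixAI | data_manipulations/help_functions_preprocessing.py | generate_conversations_quotes
-- ===== SOURCE A (Python) =====
-- from typing import List
--
-- def generate_conversations_quotes(rows: List[str], is_test: bool) -> List[str]:
--     conversations = []
--     current_conversation = " "
--     if is_test:
--         for row in rows:
--             if row[0] == '"':
--                 current_conversation += row
--                 conversations.append(current_conversation)
--                 current_conversation = " "
--                 if len(conversations) == 10:
--                     return conversations
--             else:
--                 current_conversation += row
--                 current_conversation += "\n"
--
--     else:
--         for row in rows:
--             if row[0] == '"':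
--                 current_conversation += row
--                 conversations.append(current_conversation)
--                 current_conversation = " "
--             else:
--                 current_conversation += row
--                 current_conversation += "\n"
--
--     return conversations
-- ===== SOURCE B (Python) =====
-- def generate_conversations_quotes(rows, is_test):
--     # Pass 1: partition rows into groups, each closed by a row starting with '"';
--     # a trailing group never closed by a quote row is discarded.
--     groups = []
--     current = []
--     for row in rows:
--         current.append(row)
--         if row[0] == '"':
--             groups.append(current)
--             current = []
--             if is_test and len(groups) == 10:
--                 break
--     # Pass 2: render each group as a conversation.
--     return [" " + "\n".join(g) for g in groups]
-- ===== Notes on version B (the rewrite author's own statement) =====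
-- stated objective: simpler
-- what changed: B first partitions the rows into quote-terminated groups and then renders each group with a single "\n".join, instead of A's duplicated per-branch character-by-character string accumulation in two near-identical loops.
import Mathlib
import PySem

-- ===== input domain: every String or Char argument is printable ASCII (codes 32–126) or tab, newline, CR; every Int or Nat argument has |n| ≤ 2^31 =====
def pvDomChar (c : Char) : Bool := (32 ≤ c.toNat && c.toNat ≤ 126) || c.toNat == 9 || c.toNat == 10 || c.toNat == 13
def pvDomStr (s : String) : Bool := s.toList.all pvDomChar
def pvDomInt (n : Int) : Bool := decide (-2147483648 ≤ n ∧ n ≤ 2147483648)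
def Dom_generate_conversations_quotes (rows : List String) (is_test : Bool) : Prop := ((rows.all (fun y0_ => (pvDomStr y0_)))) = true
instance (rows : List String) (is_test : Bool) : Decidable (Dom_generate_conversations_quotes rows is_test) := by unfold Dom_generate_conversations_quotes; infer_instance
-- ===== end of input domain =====

-- B replaces A's duplicated per-branch string accumulation by a partition-into-groups pass
-- followed by one "\n".join per group (objective: simpler).

-- ===== PORT A =====
-- A's test-mode loop: row[0] == '"' closes a conversation; return after the 10th.
-- (row[0] on an empty row is an IndexError in Python — excluded by Pre_; the port
-- treats the none case as a non-quote row there, which the claim never relies on.)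
def pvA_loopT : List String → List String → String → List String
  | [], convs, _cur => convs
  | row :: rest, convs, cur =>
    if PySem.Str.pyGet? row 0 = some '"' then
      let convs' := convs ++ [cur ++ row]
      if convs'.length = 10 then convs' else pvA_loopT rest convs' " "
    else pvA_loopT rest convs (cur ++ row ++ "\n")

-- A's non-test loop: same, without the length-10 early return.
def pvA_loopF : List String → List String → String → List String
  | [], convs, _cur => convs
  | row :: rest, convs, cur =>
    if PySem.Str.pyGet? row 0 = some '"' then
      pvA_loopF rest (convs ++ [cur ++ row]) " "
    else pvA_loopF rest convs (cur ++ row ++ "\n")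

def generate_conversations_quotes (rows : List String) (is_test : Bool) : List String :=
  if is_test then pvA_loopT rows [] " " else pvA_loopF rows [] " "

-- ===== PORT B =====
-- Pass 1 of Source B: partition rows into quote-terminated groups (break at 10 groups in test mode).
def pvB_go (is_test : Bool) : List String → List String → List (List String) → List (List String)
  | [], _cur, groups => groups
  | row :: rest, cur, groups =>
    let cur' := cur ++ [row]
    if PySem.Str.pyGet? row 0 = some '"' then
      let groups' := groups ++ [cur']
      if is_test && groups'.length == 10 then groups'
      else pvB_go is_test rest [] groups'
    else pvB_go is_test rest cur' groups

def generate_conversations_quotes_alt (rows : List String) (is_test : Bool) : List String :=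
  (pvB_go is_test rows [] []).map (fun g => " " ++ PySem.Str.join "\n" g)

-- ===== PRECONDITION & SPEC =====
-- Pre_ excludes exactly the inputs on which A raises IndexError (row[0] of an empty row):
-- an empty row is reached unless (test mode) ten quote-initial rows precede the first empty row.
def Pre_generate_conversations_quotes (rows : List String) (is_test : Bool) : Prop :=
  (∀ r ∈ rows, r ≠ "") ∨
  (is_test = true ∧
   10 ≤ (rows.takeWhile (fun r => !(r == ""))).countP
          (fun r => PySem.Str.pyGet? r 0 == some '"'))
instance (rows : List String) (is_test : Bool) : Decidable (Pre_generate_conversations_quotes rows is_test) := by unfold Pre_generate_conversations_quotes; infer_instance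

def pvWitness_generate_conversations_quotes : List String × Bool := (["hello", "\"yes\"", "bye"], false)

def Spec_generate_conversations_quotes (rows : List String) (is_test : Bool) (out : List String) : Prop := out = generate_conversations_quotes_alt rows is_test
instance (rows : List String) (is_test : Bool) (out : List String) : Decidable (Spec_generate_conversations_quotes rows is_test out) := by unfold Spec_generate_conversations_quotes; infer_instance

-- ===== CLAIM (what is proved, stated in full; the proofs are below) =====
def Claim_equal_generate_conversations_quotes : Prop := ∀ (rows : List String) (is_test : Bool), Dom_generate_conversations_quotes rows is_test → Pre_generate_conversations_quotes rows is_test → Spec_generate_conversations_quotes rows is_test (generate_conversations_quotes rows is_test)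

-- ===== LEMMAS AND PROOFS =====

-- A conversation as Source B renders it.
def pvConv (g : List String) : String := " " ++ PySem.Str.join "\n" g

-- The character content A's running accumulator has after the open rows l (ghost).
def pvAcc (l : List String) : List Char :=
  ' ' :: (l.map (fun r => r.toList ++ ['\n'])).flatten

lemma chars_join_cons_ne (s a : List Char) (l : List (List Char)) (h : l ≠ []) :
    PySem.Chars.join s (a :: l) = a ++ s ++ PySem.Chars.join s l := by
  cases l with
  | nil => exact absurd rfl h
  | cons b t => exact PySem.Chars.join_cons_cons ..

lemma chars_join_append_singleton (l : List (List Char)) (q : List Char) :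
    PySem.Chars.join ['\n'] (l ++ [q])
      = (l.map (fun r => r ++ ['\n'])).flatten ++ q := by
  induction l with
  | nil => simp [PySem.Chars.join_singleton]
  | cons a t ih =>
    rw [List.cons_append, chars_join_cons_ne _ _ _ (by simp), ih]
    simp

lemma conv_toList (l : List String) (q : String) :
    (pvConv (l ++ [q])).toList = pvAcc l ++ q.toList := by
  simp [pvConv, pvAcc, PySem.Str.toList_join, chars_join_append_singleton]
  rfl

lemma space_acc_nil : (" " : String).toList = pvAcc [] := by
  simp [pvAcc]

lemma loopT_eq (rows : List String) :
    ∀ (groups : List (List String)) (cur : String) (l : List String),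
      cur.toList = pvAcc l →
      pvA_loopT rows (groups.map pvConv) cur
        = (pvB_go true rows l groups).map pvConv := by
  induction rows with
  | nil => intro groups cur l _; simp [pvA_loopT, pvB_go]
  | cons row rest ih =>
    intro groups cur l hcur
    by_cases hq : PySem.Str.pyGet? row 0 = some '"'
    · have helt : cur ++ row = pvConv (l ++ [row]) := by
        apply String.ext
        simp only [String.toList_append, conv_toList, hcur]
      simp only [pvA_loopT, pvB_go]
      rw [if_pos hq, if_pos hq, helt]
      have hmap : (groups.map pvConv) ++ [pvConv (l ++ [row])]
          = (groups ++ [l ++ [row]]).map pvConv := by simp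
      rw [hmap]
      by_cases h10 : (groups ++ [l ++ [row]]).length = 10
      · rw [if_pos (by simp only [List.length_map]; exact h10), if_pos (by simp [h10])]
      · rw [if_neg (by simp only [List.length_map]; exact h10),
            if_neg (by simp only [Bool.true_and, beq_iff_eq]; exact fun h => h10 (by simpa using h))]
        exact ih (groups ++ [l ++ [row]]) " " [] space_acc_nil
    · have hacc : (cur ++ row ++ "\n").toList = pvAcc (l ++ [row]) := by
        simp [hcur, pvAcc]
      simp only [pvA_loopT, pvB_go]
      rw [if_neg hq, if_neg hq]
      exact ih groups (cur ++ row ++ "\n") (l ++ [row]) hacc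

lemma loopF_eq (rows : List String) :
    ∀ (groups : List (List String)) (cur : String) (l : List String),
      cur.toList = pvAcc l →
      pvA_loopF rows (groups.map pvConv) cur
        = (pvB_go false rows l groups).map pvConv := by
  induction rows with
  | nil => intro groups cur l _; simp [pvA_loopF, pvB_go]
  | cons row rest ih =>
    intro groups cur l hcur
    by_cases hq : PySem.Str.pyGet? row 0 = some '"'
    · have helt : cur ++ row = pvConv (l ++ [row]) := by
        apply String.ext
        simp only [String.toList_append, conv_toList, hcur]
      simp only [pvA_loopF, pvB_go]
      rw [if_pos hq, if_pos hq, helt]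
      have hmap : (groups.map pvConv) ++ [pvConv (l ++ [row])]
          = (groups ++ [l ++ [row]]).map pvConv := by simp
      rw [hmap, if_neg (by simp)]
      exact ih (groups ++ [l ++ [row]]) " " [] space_acc_nil
    · have hacc : (cur ++ row ++ "\n").toList = pvAcc (l ++ [row]) := by
        simp [hcur, pvAcc]
      simp only [pvA_loopF, pvB_go]
      rw [if_neg hq, if_neg hq]
      exact ih groups (cur ++ row ++ "\n") (l ++ [row]) hacc

-- ===== VERDICT (by name: the statement is the Claim_ definition above) =====
theorem generate_conversations_quotes_spec : Claim_equal_generate_conversations_quotes := by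
  intro rows is_test _ _
  unfold Spec_generate_conversations_quotes generate_conversations_quotes generate_conversations_quotes_alt
  cases is_test with
  | false =>
    simpa [pvConv] using loopF_eq rows [] " " [] space_acc_nil
  | true =>
    simpa [pvConv] using loopT_eq rows [] " " [] space_acc_nil
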